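-- pv_equiv track=rewrite | github.com/418704194/Course | message-in-DNA/Find_Clump.py | Count
-- ===== SOURCE A (Python) =====
-- def Count(text,kmer,n):
-- 	out=[]
-- 	dict = {}
-- 	for i in range(0,len(text)-kmer+1):
-- 		#print (i,i+len(pat),text[i:(i+len(pat))])
-- 		if text[i:(i+kmer)] in dict:
-- 			dict[text[i:(i+kmer)]]+=1
-- 		else:
-- 			dict[text[i:(i+kmer)]]=1
--
-- 	for key in dict:
-- 		if dict[key]>=n:
-- 			out.append(key)
--
-- 	return out
-- ===== SOURCE B (Python) =====
-- def Count(text, kmer, n):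
--     L = len(text) - kmer + 1
--     pairs = sorted([(text[i:(i + kmer)], i) for i in range(0, L)])
--     picked = []
--     j = 0
--     while j < len(pairs):
--         km, first = pairs[j]
--         j += 1
--         cnt = 1
--         while j < len(pairs) and pairs[j][0] == km:
--             j += 1
--             cnt += 1
--         if cnt >= n:
--             picked.append((first, km))
--     picked.sort(key=lambda p: p[0])
--     return [km for _, km in picked]
-- ===== Notes on version B (the rewrite author's own statement) =====
-- stated objective: alternative
-- what changed: Replaces the dictionary tally and its selection loop by sorting the (window, index) pairs, run-length scanning consecutive equal windows to get each k-mer's count and first index, and sorting the qualifying k-mers by first-occurrence index; no dictionary is used.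
import Mathlib
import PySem

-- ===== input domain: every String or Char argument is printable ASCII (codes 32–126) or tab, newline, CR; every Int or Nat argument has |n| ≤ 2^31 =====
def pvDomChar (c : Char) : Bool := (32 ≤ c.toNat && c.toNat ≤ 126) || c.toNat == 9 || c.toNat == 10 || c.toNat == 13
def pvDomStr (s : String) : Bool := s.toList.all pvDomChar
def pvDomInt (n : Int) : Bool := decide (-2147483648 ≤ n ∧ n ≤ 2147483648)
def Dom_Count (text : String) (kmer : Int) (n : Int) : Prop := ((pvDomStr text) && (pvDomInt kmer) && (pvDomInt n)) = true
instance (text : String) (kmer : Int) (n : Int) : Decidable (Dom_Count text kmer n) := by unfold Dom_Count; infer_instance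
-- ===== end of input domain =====

-- B: no dictionary — sort the (window, index) pairs, run-length scan equal windows, then sort qualifying k-mers by first index (alternative algorithm, not faster).

-- ===== PORT A =====
def Count (text : String) (kmer : Int) (n : Int) : List String :=
  let d : PySem.Dict String Int :=
    (PySem.List.pyRange 0 (PySem.Str.len text - kmer + 1) 1).foldl
      (fun d i =>
        let km := PySem.Str.slice text (some i) (some (i + kmer))
        if d.contains km then d.modify km 0 (· + 1) else d.insert km 1)
      PySem.Dict.empty
  d.keys.foldl (fun out key => if d.getD key 0 ≥ n then out ++ [key] else out) []

-- ===== PORT B =====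
-- outer while loop of Source B: peel one run of consecutive equal windows per step
def pvRuns (n : Int) : List (String × Int) → List (Int × String)
  | [] => []
  | (km, first) :: rest =>
      let same := rest.takeWhile (fun p => p.1 == km)
      let restr := rest.dropWhile (fun p => p.1 == km)
      if n ≤ 1 + (same.length : Int) then (first, km) :: pvRuns n restr
      else pvRuns n restr
  termination_by l => l.length
  decreasing_by
    · have := List.length_dropWhile_le (fun p : String × Int => p.1 == km) rest
      simp; omega
    · have := List.length_dropWhile_le (fun p : String × Int => p.1 == km) rest
      simp; omega

def Count_alt (text : String) (kmer : Int) (n : Int) : List String :=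
  -- sorted(pairs): Python's sort is stable with lexicographic tuple comparison = stable mergeSort by toLex ≤
  let pairs := ((PySem.List.pyRange 0 (PySem.Str.len text - kmer + 1) 1).map
        (fun i => (PySem.Str.slice text (some i) (some (i + kmer)), i))).mergeSort
        (fun p q => decide (toLex p ≤ toLex q))
  -- picked.sort(key=lambda p: p[0]): stable sort on the first component
  let picked := (pvRuns n pairs).mergeSort (fun p q => decide (p.1 ≤ q.1))
  picked.map (fun p => p.2)

-- ===== PRECONDITION & SPEC =====
def Spec_Count (text : String) (kmer : Int) (n : Int) (out : List String) : Prop := out = Count_alt text kmer n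
instance (text : String) (kmer : Int) (n : Int) (out : List String) : Decidable (Spec_Count text kmer n out) := by unfold Spec_Count; infer_instance

-- ===== CLAIM (what is proved, stated in full; the proofs are below) =====
def Claim_equal_Count : Prop := ∀ (text : String) (kmer : Int) (n : Int), Dom_Count text kmer n → Spec_Count text kmer n (Count text kmer n)

-- ===== LEMMAS AND PROOFS =====

-- the common canonical form: distinct windows in first-occurrence order, kept iff their occurrence count is ≥ n
def pvCanon (f : Int → String) (R : List Int) (n : Int) : List String :=
  (PySem.List.dedup (R.map f)).filter
    (fun km => decide (n ≤ (((R.filter (fun i => f i == km)).length : Int))))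

def pvGroup (f : Int → String) (R : List Int) (km : String) : List (String × Int) :=
  (R.filter (fun i => f i == km)).map (fun i => (km, i))

def pvFirst (f : Int → String) (R : List Int) (km : String) : Int :=
  (R.filter (fun i => f i == km)).headD 0

lemma count_map_eq_length_filter (R : List Int) (f : Int → String) (km : String) :
    (R.map f).count km = (R.filter (fun i => f i == km)).length := by
  simp [List.count_eq_countP, List.countP_eq_length_filter, List.filter_map, Function.comp_def]

lemma pyRange_pairwise_lt (m : Int) : (PySem.List.pyRange 0 m 1).Pairwise (· < ·) := by
  by_cases h : m ≤ 0
  · have hnil : PySem.List.pyRange 0 m 1 = [] := by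
      simp [PySem.List.pyRange, show ¬ ((0:Int) < m) from not_lt.mpr h]
    simp [hnil]
  · have hm : m = ((m.toNat : Nat) : Int) := by omega
    rw [hm, PySem.List.pyRange_zero_natCast]
    exact List.pairwise_lt_range.map _ (fun a b hab => by exact_mod_cast hab)

lemma takeWhile_dropWhile_split {α : Type} (p : α → Bool) (xs ys : List α)
    (h1 : ∀ x ∈ xs, p x = true) (h2 : ∀ y ∈ ys, p y = false) :
    (xs ++ ys).takeWhile p = xs ∧ (xs ++ ys).dropWhile p = ys := by
  induction xs with
  | nil =>
    simp only [List.nil_append]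
    cases ys with
    | nil => simp
    | cons y t => simp [List.takeWhile, List.dropWhile, h2 y (by simp)]
  | cons x t ih =>
    have hx := h1 x (by simp)
    have := ih (fun a ha => h1 a (by simp [ha]))
    simp [hx, this.1, this.2]

-- the run-length scan over the concatenated groups picks each k-mer once, with its count and first index
lemma pvRuns_flatMap (f : Int → String) (R : List Int) (n : Int) :
    ∀ ks : List String, (∀ km ∈ ks, km ∈ R.map f) → ks.Nodup →
    pvRuns n (ks.flatMap (pvGroup f R)) =
      (ks.filter (fun km => decide (n ≤ (((R.filter (fun i => f i == km)).length : Int))))).map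
        (fun km => (pvFirst f R km, km)) := by
  intro ks
  induction ks with
  | nil => intro _ _; simp [pvRuns]
  | cons km ks ih =>
    intro hmem hnd
    have hkm : km ∈ R.map f := hmem km (by simp)
    have hne : R.filter (fun i => f i == km) ≠ [] := by
      obtain ⟨i, hiR, hfi⟩ := List.mem_map.mp hkm
      intro hcon
      have hmemf : i ∈ R.filter (fun i => f i == km) := by
        simp [List.mem_filter, hiR, hfi]
      rw [hcon] at hmemf
      exact (List.not_mem_nil hmemf)
    obtain ⟨a, F', hF⟩ := List.exists_cons_of_ne_nil hne
    have hgroup : pvGroup f R km = (km, a) :: F'.map (fun i => (km, i)) := by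
      simp [pvGroup, hF]
    have hrest_fst : ∀ p ∈ ks.flatMap (pvGroup f R), ((p.1 == km) = false) := by
      intro p hp
      obtain ⟨km', hkm', hpg⟩ := List.mem_flatMap.mp hp
      have hp1 : p.1 = km' := by
        simp only [pvGroup, List.mem_map] at hpg
        obtain ⟨i, _, hi⟩ := hpg
        rw [← hi]
      have : km' ≠ km := by
        intro hcon; rw [hcon] at hkm'
        exact (List.nodup_cons.mp hnd).1 hkm'
      simp [hp1, this]
    have hsplit := takeWhile_dropWhile_split (fun p : String × Int => p.1 == km)
        (F'.map (fun i => (km, i))) (ks.flatMap (pvGroup f R))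
        (by intro x hx
            simp only [List.mem_map] at hx
            obtain ⟨i, _, hi⟩ := hx
            rw [← hi]
            simp)
        hrest_fst
    rw [List.flatMap_cons, hgroup]
    have hlen : ((R.filter (fun i => f i == km)).length : Int) = 1 + (F'.length : Int) := by
      rw [hF]; simp; omega
    have hfirst : pvFirst f R km = a := by simp [pvFirst, hF]
    have ihr := ih (fun k hk => hmem k (by simp [hk])) (List.nodup_cons.mp hnd).2
    show pvRuns n ((km, a) :: (F'.map (fun i => (km, i)) ++ ks.flatMap (pvGroup f R))) = _
    rw [pvRuns, hsplit.1, hsplit.2]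
    simp only [List.length_map]
    by_cases hn : n ≤ 1 + (F'.length : Int)
    · rw [if_pos hn, ihr]
      rw [List.filter_cons_of_pos (by simp [hlen]; omega), List.map_cons, hfirst]
    · rw [if_neg hn, ihr]
      rw [List.filter_cons_of_neg (by simp [hlen]; omega)]

lemma headD_append_of_ne_nil {α : Type} (xs ys : List α) (d : α) (h : xs ≠ []) :
    (xs ++ ys).headD d = xs.headD d := by
  cases xs with
  | nil => exact absurd rfl h
  | cons a t => simp

lemma dedup_append_singleton {α : Type} [BEq α] [LawfulBEq α] (l : List α) (x : α) :
    PySem.List.dedup (l ++ [x]) =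
      if x ∈ PySem.List.dedup l then PySem.List.dedup l else PySem.List.dedup l ++ [x] := by
  rw [PySem.List.dedup_eq_ofList, PySem.List.dedup_eq_ofList,
      PySem.Set.ofList_append_singleton, PySem.Set.add]
  by_cases h : x ∈ PySem.Set.ofList l
  · rw [if_pos (by simpa using h), if_pos h]
  · rw [if_neg (by simpa using h), if_neg h]

-- dedup lists distinct values in first-occurrence order: their first indices are strictly increasing
lemma dedup_pairwise_first (f : Int → String) (R : List Int) (hR : R.Pairwise (· < ·)) :
    (PySem.List.dedup (R.map f)).Pairwise (fun a b => pvFirst f R a < pvFirst f R b) := by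
  induction R using List.reverseRecOn with
  | nil => simp [PySem.List.dedup_eq_ofList, PySem.Set.ofList, PySem.Set.empty]
  | append_singleton xs i ih =>
    obtain ⟨hxs, -, hcross⟩ := List.pairwise_append.mp hR
    have hlt : ∀ j ∈ xs, j < i := fun j hj => hcross j hj i (by simp)
    have hstab : ∀ km ∈ xs.map f, pvFirst f (xs ++ [i]) km = pvFirst f xs km := by
      intro km hkm
      have hne : xs.filter (fun j => f j == km) ≠ [] := by
        obtain ⟨j, hj, hfj⟩ := List.mem_map.mp hkm
        intro hcon
        have : ¬ ((fun j => f j == km) j = true) := (List.filter_eq_nil_iff.mp hcon) j hj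
        simp [hfj] at this
      unfold pvFirst
      rw [List.filter_append, headD_append_of_ne_nil _ _ _ hne]
    have hmem_first : ∀ km ∈ xs.map f, pvFirst f xs km ∈ xs := by
      intro km hkm
      have hne : xs.filter (fun j => f j == km) ≠ [] := by
        obtain ⟨j, hj, hfj⟩ := List.mem_map.mp hkm
        intro hcon
        have : ¬ ((fun j => f j == km) j = true) := (List.filter_eq_nil_iff.mp hcon) j hj
        simp [hfj] at this
      unfold pvFirst
      obtain ⟨a, t, hat⟩ := List.exists_cons_of_ne_nil hne
      have : a ∈ xs.filter (fun j => f j == km) := by rw [hat]; simp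
      rw [hat]
      simpa using (List.mem_filter.mp this).1
    have ihx := ih hxs
    rw [List.map_append, List.map_singleton, dedup_append_singleton]
    by_cases hx : f i ∈ PySem.List.dedup (xs.map f)
    · rw [if_pos hx]
      exact ihx.imp_of_mem (fun {a b} ha hb hab => by
        rw [hstab a ((PySem.List.mem_dedup _ _).mp ha),
            hstab b ((PySem.List.mem_dedup _ _).mp hb)]
        exact hab)
    · rw [if_neg hx]
      rw [List.pairwise_append]
      refine ⟨ihx.imp_of_mem (fun {a b} ha hb hab => by
        rw [hstab a ((PySem.List.mem_dedup _ _).mp ha),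
            hstab b ((PySem.List.mem_dedup _ _).mp hb)]
        exact hab), by simp, ?_⟩
      intro a ha b hb
      rw [List.mem_singleton] at hb
      subst hb
      have haf : a ∈ xs.map f := (PySem.List.mem_dedup _ _).mp ha
      have hfresh : pvFirst f (xs ++ [i]) (f i) = i := by
        have hnil : xs.filter (fun j => f j == f i) = [] := by
          rw [List.filter_eq_nil_iff]
          intro j hj hcon
          exact hx ((PySem.List.mem_dedup _ _).mpr (List.mem_map.mpr ⟨j, hj, by simpa using hcon⟩))
        unfold pvFirst
        rw [List.filter_append, hnil]
        simp
      rw [hstab a haf, hfresh]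
      exact hlt _ (hmem_first a haf)

lemma eq_of_perm_of_pairwise {α κ : Type} [LinearOrder κ] (key : α → κ) :
    ∀ (ms ys : List α), ms.Perm ys → ms.Pairwise (fun a b => key a ≤ key b) →
      ys.Pairwise (fun a b => key a < key b) → ms = ys := by
  intro ms
  induction ms with
  | nil =>
    intro ys h _ _
    exact (List.Perm.nil_eq h).symm ▸ rfl
  | cons m mt ih =>
    intro ys h hle hlt
    cases ys with
    | nil => exact absurd h.symm (by simp)
    | cons y yt =>
      have hmy : m = y := by
        by_contra hne
        have hm_mem : m ∈ y :: yt := h.mem_iff.mp (by simp)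
        have hy_mem : y ∈ m :: mt := h.mem_iff.mpr (by simp)
        have h1 : key y < key m := by
          rcases List.mem_cons.mp hm_mem with h' | h'
          · exact absurd h' hne
          · exact (List.pairwise_cons.mp hlt).1 m h'
        have h2 : key m ≤ key y := by
          rcases List.mem_cons.mp hy_mem with h' | h'
          · rw [h']
          · exact (List.pairwise_cons.mp hle).1 y h'
        exact absurd h1 (not_lt.mpr h2)
      subst hmy
      rw [ih yt h.cons_inv (List.pairwise_cons.mp hle).2 (List.pairwise_cons.mp hlt).2]

lemma mergeSort_eq_of_perm_of_pairwise_lt {α κ : Type} [LinearOrder κ] (key : α → κ)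
    (xs ys : List α) (h : ys.Perm xs) (hp : ys.Pairwise (fun a b => key a < key b)) :
    xs.mergeSort (fun a b => decide (key a ≤ key b)) = ys := by
  apply eq_of_perm_of_pairwise key
  · exact (List.mergeSort_perm xs _).trans h.symm
  · have hms := List.pairwise_mergeSort (le := fun a b => decide (key a ≤ key b))
      (fun a b c hab hbc =>
        decide_eq_true (le_trans (of_decide_eq_true hab) (of_decide_eq_true hbc)))
      (fun a b => by
        by_cases hab : key a ≤ key b
        · simp [hab]
        · simp [(not_le.mp hab).le]) xs
    exact hms.imp (fun hx => of_decide_eq_true hx)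
  · exact hp

-- B's whole pipeline, over an arbitrary strictly increasing index list
lemma alt_general (f : Int → String) (n : Int) (R : List Int) (hR : R.Pairwise (· < ·)) :
    ((pvRuns n ((R.map (fun i => (f i, i))).mergeSort (fun p q => decide (toLex p ≤ toLex q)))).mergeSort
      (fun p q => decide (p.1 ≤ q.1))).map (fun p => p.2) = pvCanon f R n := by
  have hRnd : R.Nodup := hR.imp (fun h => ne_of_lt h)
  set w := R.map f with hw
  set ks := PySem.List.sorted (PySem.List.dedup w) (fun x => x) with hks
  have hks_mem : ∀ km ∈ ks, km ∈ w := by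
    intro km hkm
    rw [hks, PySem.List.mem_sorted] at hkm
    exact (PySem.List.mem_dedup _ _).mp hkm
  have hks_nd : ks.Nodup := by
    have := PySem.List.sorted_perm (PySem.List.dedup w) (fun x => x) false
    exact this.nodup_iff.mpr (PySem.List.nodup_dedup w)
  have hks_lt : ks.Pairwise (· < ·) := by
    rw [hks, PySem.List.dedup_eq_ofList]
    exact PySem.List.sorted_ofList_pairwise_lt w
  have hgrp_ne : ∀ km ∈ ks, R.filter (fun i => f i == km) ≠ [] := by
    intro km hkm hcon
    obtain ⟨j, hj, hfj⟩ := List.mem_map.mp (hks_mem km hkm)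
    have : ¬ ((fun i => f i == km) j = true) := (List.filter_eq_nil_iff.mp hcon) j hj
    simp [hfj] at this
  have hys_nodup : (ks.flatMap (pvGroup f R)).Nodup := by
    rw [List.nodup_flatMap]
    refine ⟨fun km _ => ?_, ?_⟩
    · exact (hRnd.filter _).map (fun a b hab => by simpa using hab)
    · exact hks_nd.imp (fun {a b} hab => by
        intro p hp hq
        simp only [pvGroup, List.mem_map] at hp hq
        obtain ⟨i1, -, h1⟩ := hp
        obtain ⟨i2, -, h2⟩ := hq
        rw [← h1] at h2
        exact hab ((Prod.mk.injEq _ _ _ _).mp h2).1.symm)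
  have hys_mem : ∀ p : String × Int, p ∈ ks.flatMap (pvGroup f R) ↔ p ∈ R.map (fun i => (f i, i)) := by
    intro p
    constructor
    · intro hp
      obtain ⟨km, hkm, hpg⟩ := List.mem_flatMap.mp hp
      simp only [pvGroup, List.mem_map] at hpg
      obtain ⟨i, hi, hip⟩ := hpg
      have hfi : f i = km := by simpa using (List.mem_filter.mp hi).2
      exact List.mem_map.mpr ⟨i, (List.mem_filter.mp hi).1, by rw [← hip, hfi]⟩
    · intro hp
      obtain ⟨i, hi, hip⟩ := List.mem_map.mp hp
      refine List.mem_flatMap.mpr ⟨f i, ?_, ?_⟩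
      · rw [hks, PySem.List.mem_sorted]
        exact (PySem.List.mem_dedup _ _).mpr (List.mem_map.mpr ⟨i, hi, rfl⟩)
      · simp only [pvGroup, List.mem_map]
        exact ⟨i, List.mem_filter.mpr ⟨hi, by simp⟩, hip⟩
  have hys_perm : (ks.flatMap (pvGroup f R)).Perm (R.map (fun i => (f i, i))) := by
    refine (List.perm_ext_iff_of_nodup hys_nodup ?_).mpr hys_mem
    exact hRnd.map (fun a b hab => by
      simpa using (Prod.mk.injEq _ _ _ _).mp hab |>.2)
  have hys_lex : (ks.flatMap (pvGroup f R)).Pairwise (fun p q => toLex p < toLex q) := by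
    rw [List.pairwise_flatMap]
    constructor
    · intro km _
      rw [pvGroup, List.pairwise_map]
      exact (hR.filter _).imp (fun {a b} hab => by
        rw [Prod.Lex.toLex_lt_toLex]; exact Or.inr ⟨rfl, hab⟩)
    · exact hks_lt.imp (fun {a b} hab => by
        intro x hx y hy
        simp only [pvGroup, List.mem_map] at hx hy
        obtain ⟨i1, -, h1⟩ := hx
        obtain ⟨i2, -, h2⟩ := hy
        rw [← h1, ← h2, Prod.Lex.toLex_lt_toLex]
        exact Or.inl hab)
  rw [mergeSort_eq_of_perm_of_pairwise_lt (fun p => toLex p) _ _ hys_perm hys_lex]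
  rw [pvRuns_flatMap f R n ks hks_mem hks_nd]
  set pred := fun km => decide (n ≤ (((R.filter (fun i => f i == km)).length : Int))) with hpred
  have hzs_perm :
      (((PySem.List.dedup w).filter pred).map (fun km => (pvFirst f R km, km))).Perm
        ((ks.filter pred).map (fun km => (pvFirst f R km, km))) := by
    exact (((PySem.List.sorted_perm (PySem.List.dedup w) (fun x => x) false).symm.filter pred).map _)
  have hzs_pw :
      (((PySem.List.dedup w).filter pred).map (fun km => (pvFirst f R km, km))).Pairwise
        (fun p q => p.1 < q.1) := by
    rw [List.pairwise_map]
    exact ((dedup_pairwise_first f R hR).filter pred).imp (fun {a b} hab => hab)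
  rw [mergeSort_eq_of_perm_of_pairwise_lt (fun p : Int × String => p.1) _ _ hzs_perm hzs_pw]
  rw [pvCanon, List.map_map]
  have hid : ((fun p : Int × String => p.2) ∘ fun km => (pvFirst f R km, km)) = fun km => km := rfl
  rw [hid, List.map_id']

lemma count_step_eq (d : PySem.Dict String Int) (km : String) :
    (if d.contains km then d.modify km 0 (· + 1) else d.insert km 1)
      = d.modify km 0 (· + 1) := by
  by_cases h : d.contains km = true
  · simp [h]
  · have hc : d.contains km = false := by simpa using h
    simp [hc, PySem.Dict.modify, PySem.Dict.getD_of_not_contains d (0 : Int) hc]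

lemma a_canon (text : String) (kmer : Int) (n : Int) :
    Count text kmer n
      = pvCanon (fun i => PySem.Str.slice text (some i) (some (i + kmer)))
          (PySem.List.pyRange 0 (PySem.Str.len text - kmer + 1) 1) n := by
  unfold Count pvCanon
  rw [show (fun (d : PySem.Dict String Int) (i : Int) =>
        let km := PySem.Str.slice text (some i) (some (i + kmer))
        if d.contains km then d.modify km 0 (· + 1) else d.insert km 1)
      = (fun d i => d.modify (PySem.Str.slice text (some i) (some (i + kmer))) 0 (· + 1))
      from funext fun d => funext fun i => count_step_eq d _]
  rw [show (PySem.List.pyRange 0 (PySem.Str.len text - kmer + 1) 1).foldl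
        (fun (d : PySem.Dict String Int) i =>
          d.modify (PySem.Str.slice text (some i) (some (i + kmer))) 0 (· + 1))
        PySem.Dict.empty
      = ((PySem.List.pyRange 0 (PySem.Str.len text - kmer + 1) 1).map
          (fun i => PySem.Str.slice text (some i) (some (i + kmer)))).foldl
          (fun d km => d.modify km 0 (· + 1)) PySem.Dict.empty
      from (List.foldl_map (f := fun i => PySem.Str.slice text (some i) (some (i + kmer)))
        (g := fun (d : PySem.Dict String Int) km => d.modify km 0 (· + 1))).symm]
  rw [← PySem.Dict.counter_eq_foldl]
  have h := PySem.List.foldl_append_if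
    (p := fun key => decide (n ≤ ((((PySem.List.pyRange 0 (PySem.Str.len text - kmer + 1) 1).map
        (fun i => PySem.Str.slice text (some i) (some (i + kmer)))).count key : Int))))
    (f := fun x => x)
    (l := PySem.Set.ofList ((PySem.List.pyRange 0 (PySem.Str.len text - kmer + 1) 1).map
        (fun i => PySem.Str.slice text (some i) (some (i + kmer)))))
    (acc := [])
  simp only [decide_eq_true_eq, List.nil_append, List.map_id'] at h
  simp only [PySem.Dict.keys_counter, PySem.Dict.getD_counter, ge_iff_le, h]
  rw [PySem.List.dedup_eq_ofList]
  refine List.filter_congr ?_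
  intro km _
  rw [count_map_eq_length_filter]

-- ===== VERDICT (by name: the statement is the Claim_ definition above) =====
theorem Count_spec : Claim_equal_Count := by
  intro text kmer n _
  unfold Spec_Count
  rw [a_canon]
  unfold Count_alt
  rw [alt_general _ n _ (pyRange_pairwise_lt _)]
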